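-- pv_equiv track=rewrite | github.com/Mach-web/HackerRank | pile_items.py | pile_items
-- ===== SOURCE A (Python) =====
-- def pile_items(length, arr):
--     for _ in range(length):
--         # an array can definitely form a stack if it has 2 elements
--         if len(arr) == 2:
--             return 'Yes'
--
--         elif int(arr[-1]) > int(arr[0]):
--             if int(arr[-2]) > int(arr[-1]):
--             # Given that the element at the chosen edge was largest, return No if it is smaller than next element
--                 return 'No'
--                 break
--             else:
--                 arr.pop(-1)
--
--         elif int(arr[0]) >= int(arr[-1]):
--             if int(arr[1]) > int(arr[0]):
--                 return 'No'
--                 break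
--             else:
--                 arr.pop(0)
-- ===== SOURCE B (Python) =====
-- def pile_items(length, arr):
--     # Two-pointer scan: O(n), no list mutation (A pops from arr in place; return value only).
--     i, j = 0, len(arr) - 1
--     for _ in range(length):
--         if j - i == 1:
--             return 'Yes'
--         if arr[j] > arr[i]:
--             if arr[j - 1] > arr[j]:
--                 return 'No'
--             j -= 1
--         else:
--             if arr[i + 1] > arr[i]:
--                 return 'No'
--             i += 1
--     return None
-- ===== Notes on version B (the rewrite author's own statement) =====
-- stated objective: faster
-- what changed: Replaces A's repeated arr.pop(0)/arr.pop(-1) list mutation with a two-pointer scan over the unmodified list; B compares only the return value and never mutates arr.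
import Mathlib
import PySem

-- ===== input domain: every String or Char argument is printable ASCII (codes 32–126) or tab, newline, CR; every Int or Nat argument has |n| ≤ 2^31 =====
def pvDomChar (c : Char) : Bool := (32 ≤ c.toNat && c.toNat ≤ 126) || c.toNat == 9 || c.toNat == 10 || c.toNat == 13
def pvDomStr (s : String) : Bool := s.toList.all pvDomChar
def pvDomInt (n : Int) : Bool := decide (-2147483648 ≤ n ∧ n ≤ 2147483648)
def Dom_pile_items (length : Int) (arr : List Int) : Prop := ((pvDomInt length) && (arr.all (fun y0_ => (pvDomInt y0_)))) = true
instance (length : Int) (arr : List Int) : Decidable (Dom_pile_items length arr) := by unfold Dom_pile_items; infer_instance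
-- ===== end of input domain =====

-- B replaces A's pop-from-either-end loop (pop(0) is O(n)) by an O(n) two-pointer scan;
-- equivalence is about the RETURN value only: A mutates arr in place, B does not.

-- ===== PORT A =====
-- the for-loop of A: fuel = number of remaining iterations of `range(length)`;
-- `none` from exhausted fuel = Python's falling off the loop (returns None);
-- a `none` arm of a pyGet?/pop? match = IndexError (excluded by Pre_).
def pvPileA : Nat → List Int → Option String
  | 0, _ => none
  | Nat.succ n, arr =>
    if arr.length = 2 then some "Yes"
    else
      match PySem.List.pyGet? arr (-1), PySem.List.pyGet? arr 0 with
      | some last, some first =>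
        if last > first then
          match PySem.List.pyGet? arr (-2) with
          | some penult =>
            if penult > last then some "No"
            else
              match PySem.List.pop? arr with   -- arr.pop(-1)
              | some (_, arr') => pvPileA n arr'
              | none => none
          | none => none
        else if first ≥ last then
          match PySem.List.pyGet? arr 1 with
          | some second =>
            if second > first then some "No"
            else
              match PySem.List.pop? arr 0 with   -- arr.pop(0)
              | some (_, arr') => pvPileA n arr'
              | none => none
          | none => none
        else pvPileA n arr   -- no branch taken: loop continues (unreachable for Int values)
      | _, _ => none

def pile_items (length : Int) (arr : List Int) : Option String :=
  pvPileA length.toNat arr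

-- ===== PORT B =====
-- two pointers i, j into the untouched list; fuel = remaining iterations of `range(length)`
def pvPileB (arr : List Int) : Nat → Int → Int → Option String
  | 0, _, _ => none
  | Nat.succ n, i, j =>
    if j - i = 1 then some "Yes"
    else
      match PySem.List.pyGet? arr j, PySem.List.pyGet? arr i with
      | some aj, some ai =>
        if aj > ai then
          match PySem.List.pyGet? arr (j - 1) with
          | some x => if x > aj then some "No" else pvPileB arr n i (j - 1)
          | none => none
        else
          match PySem.List.pyGet? arr (i + 1) with
          | some x => if x > ai then some "No" else pvPileB arr n (i + 1) j
          | none => none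
      | _, _ => none

def pile_items_alt (length : Int) (arr : List Int) : Option String :=
  pvPileB arr length.toNat 0 (PySem.List.len arr - 1)

-- ===== PRECONDITION & SPEC =====
-- Pre_ excludes exactly the inputs on which A raises IndexError: a list of fewer than
-- 2 elements while the loop body runs at least once (length ≥ 1).
def Pre_pile_items (length : Int) (arr : List Int) : Prop :=
  length ≤ 0 ∨ 2 ≤ arr.length

instance (length : Int) (arr : List Int) : Decidable (Pre_pile_items length arr) := by
  unfold Pre_pile_items; infer_instance

def pvWitness_pile_items : Int × List Int := (4, [4, 3, 2, 1, 5])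

def Spec_pile_items (length : Int) (arr : List Int) (out : Option String) : Prop :=
  out = pile_items_alt length arr

instance (length : Int) (arr : List Int) (out : Option String) : Decidable (Spec_pile_items length arr out) := by
  unfold Spec_pile_items; infer_instance

-- ===== CLAIM (what is proved, stated in full; the proofs are below) =====
def Claim_equal_pile_items : Prop := ∀ (length : Int) (arr : List Int), Dom_pile_items length arr → Pre_pile_items length arr → Spec_pile_items length arr (pile_items length arr)

-- ===== LEMMAS AND PROOFS =====

-- the segment of arr that A's shrinking list holds when B's pointers are at (i, j)
def pvSeg (arr : List Int) (i j : Nat) : List Int := (arr.drop i).take (j + 1 - i)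

lemma pvSeg_length (arr : List Int) (i j : Nat) (hj : j < arr.length) :
    (pvSeg arr i j).length = j + 1 - i := by
  simp [pvSeg]; omega

lemma pvSeg_getElem? (arr : List Int) (i j k : Nat) (hk : k < j + 1 - i) :
    (pvSeg arr i j)[k]? = arr[i + k]? := by
  simp [pvSeg, List.getElem?_drop, hk]

lemma pvSeg_tail (arr : List Int) (i j : Nat) :
    (pvSeg arr i j).tail = pvSeg arr (i + 1) j := by
  simp only [pvSeg, ← List.drop_one, List.drop_take, List.drop_drop]
  congr 1

lemma pvSeg_dropLast (arr : List Int) (i j : Nat) (hij : i + 1 ≤ j) (hj : j < arr.length) :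
    (pvSeg arr i j).dropLast = pvSeg arr i (j - 1) := by
  rw [List.dropLast_eq_take, pvSeg_length arr i j hj]
  simp only [pvSeg, List.take_take]
  congr 1
  omega

lemma pv_loop_eq (arr : List Int) : ∀ (n i j : Nat), i + 1 ≤ j → j < arr.length →
    pvPileA n (pvSeg arr i j) = pvPileB arr n (i : Int) (j : Int) := by
  intro n
  induction n with
  | zero => intros; rfl
  | succ n ih =>
    intro i j hij hj
    have hlen : (pvSeg arr i j).length = j + 1 - i := pvSeg_length arr i j hj
    obtain ⟨aj, hvj⟩ : ∃ x, arr[j]? = some x := ⟨_, List.getElem?_eq_getElem hj⟩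
    obtain ⟨ai, hvi⟩ : ∃ x, arr[i]? = some x := ⟨_, List.getElem?_eq_getElem (by omega)⟩
    by_cases h2 : j = i + 1
    · -- segment of length 2: both sides return 'Yes'
      subst h2
      simp only [pvPileA, pvPileB, hlen]
      rw [if_pos (show i + 1 + 1 - i = 2 by omega),
          if_pos (show ((i + 1 : Nat) : Int) - (i : Int) = 1 by omega)]
    · obtain ⟨p, hvp⟩ : ∃ x, arr[j - 1]? = some x := ⟨_, List.getElem?_eq_getElem (by omega)⟩
      obtain ⟨q, hvq⟩ : ∃ x, arr[i + 1]? = some x := ⟨_, List.getElem?_eq_getElem (by omega)⟩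
      -- the four reads of A's loop body, on the segment
      have hA1 : PySem.List.pyGet? (pvSeg arr i j) (-1) = some aj := by
        rw [PySem.List.pyGet?_neg_ofNat _ 1 (by omega) (by omega), hlen,
            show j + 1 - i - 1 = j - i by omega,
            pvSeg_getElem? arr i j (j - i) (by omega),
            show i + (j - i) = j by omega, hvj]
      have hA0 : PySem.List.pyGet? (pvSeg arr i j) 0 = some ai := by
        rw [PySem.List.pyGet?_zero, pvSeg_getElem? arr i j 0 (by omega)]
        rw [show i + 0 = i from rfl, hvi]
      have hA2 : PySem.List.pyGet? (pvSeg arr i j) (-2) = some p := by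
        rw [PySem.List.pyGet?_neg_ofNat _ 2 (by omega) (by omega), hlen,
            show j + 1 - i - 2 = j - 1 - i by omega,
            pvSeg_getElem? arr i j (j - 1 - i) (by omega),
            show i + (j - 1 - i) = j - 1 by omega, hvp]
      have hA3 : PySem.List.pyGet? (pvSeg arr i j) 1 = some q := by
        rw [show (1 : Int) = ((1 : Nat) : Int) from rfl, PySem.List.pyGet?_natCast,
            pvSeg_getElem? arr i j 1 (by omega), hvq]
      -- the same four reads by B's pointers
      have hB1 : PySem.List.pyGet? arr (j : Int) = some aj := by
        rw [PySem.List.pyGet?_natCast, hvj]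
      have hB0 : PySem.List.pyGet? arr (i : Int) = some ai := by
        rw [PySem.List.pyGet?_natCast, hvi]
      have hB2 : PySem.List.pyGet? arr ((j : Int) - 1) = some p := by
        rw [show (j : Int) - 1 = ((j - 1 : Nat) : Int) by omega, PySem.List.pyGet?_natCast, hvp]
      have hB3 : PySem.List.pyGet? arr ((i : Int) + 1) = some q := by
        rw [show (i : Int) + 1 = ((i + 1 : Nat) : Int) by omega, PySem.List.pyGet?_natCast, hvq]
      -- the two pops shrink the segment by one, at the matching end
      have hne : pvSeg arr i j ≠ [] := by
        intro h; rw [h] at hlen; simp at hlen; omega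
      have hpopL : PySem.List.pop? (pvSeg arr i j) =
          some ((pvSeg arr i j).getLast hne, pvSeg arr i (j - 1)) := by
        conv_lhs => rw [← List.dropLast_concat_getLast hne]
        rw [PySem.List.pop?_last, pvSeg_dropLast arr i j (by omega) hj]
      obtain ⟨x, rest, hx⟩ := List.exists_cons_of_ne_nil hne
      have hpop0 : PySem.List.pop? (pvSeg arr i j) 0 = some (x, pvSeg arr (i + 1) j) := by
        rw [hx, PySem.List.pop?_zero_cons, ← pvSeg_tail arr i j, hx]
        rfl
      have hlen2 : ¬ (j + 1 - i = 2) := by omega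
      have hBlen : ¬ ((j : Int) - (i : Int) = 1) := by omega
      simp only [pvPileA, pvPileB, hlen, hA1, hA0, hA2, hA3, hB1, hB0, hB2, hB3,
        hpopL, hpop0, if_neg hlen2, if_neg hBlen]
      by_cases hcmp : aj > ai
      · simp only [if_pos hcmp]
        by_cases hno : p > aj
        · simp only [if_pos hno]
        · simp only [if_neg hno]
          rw [show (j : Int) - 1 = ((j - 1 : Nat) : Int) by omega]
          exact ih i (j - 1) (by omega) (by omega)
      · have hge : ai ≥ aj := le_of_not_gt hcmp
        simp only [if_neg hcmp, if_pos hge]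
        by_cases hno : q > ai
        · simp only [if_pos hno]
        · simp only [if_neg hno]
          rw [show (i : Int) + 1 = ((i + 1 : Nat) : Int) by omega]
          exact ih (i + 1) j (by omega) (by omega)

-- ===== VERDICT (by name: the statement is the Claim_ definition above) =====
theorem pile_items_spec : Claim_equal_pile_items := by
  intro length arr _ hpre
  unfold Spec_pile_items pile_items pile_items_alt
  cases hn : length.toNat with
  | zero => rfl
  | succ m =>
    have h2 : 2 ≤ arr.length := by
      rcases hpre with h | h
      · rw [Int.toNat_of_nonpos h] at hn; exact absurd hn (by simp)
      · exact h
    have key := pv_loop_eq arr (m + 1) 0 (arr.length - 1) (by omega) (by omega)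
    have hseg : pvSeg arr 0 (arr.length - 1) = arr := by
      simp [pvSeg]; omega
    rw [hseg] at key
    rw [show PySem.List.len arr - 1 = ((arr.length - 1 : Nat) : Int) by
          simp [PySem.List.len_eq]; omega,
        show (0 : Int) = ((0 : Nat) : Int) from rfl]
    exact key
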